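-- pv_equiv track=rewrite | github.com/shengy915/ntu | sc1003 practice/week_11_ans.py | binary_strings_hw_helper
-- ===== SOURCE A (Python) =====
-- def binary_strings_hw_helper(n, c, prefix = "", hw_so_far=0):
--     if n == 0 and hw_so_far <= c:
--         return [prefix]
--     else:
--         results = []
--         if hw_so_far < c:
--             results.extend(binary_strings_hw_helper(n - 1, c, prefix + "1", hw_so_far + 1))
--         results.extend(binary_strings_hw_helper(n - 1, c, prefix + "0", hw_so_far))
--         return results
-- ===== SOURCE B (Python) =====
-- def binary_strings_hw_helper(n, c, prefix="", hw_so_far=0):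
--     results = []
--     stack = [(n, prefix, hw_so_far)]
--     while stack:
--         m, p, hw = stack.pop()
--         if m == 0 and hw <= c:
--             results.append(p)
--         else:
--             stack.append((m - 1, p + "0", hw))
--             if hw < c:
--                 stack.append((m - 1, p + "1", hw + 1))
--     return results
-- ===== Notes on version B (the rewrite author's own statement) =====
-- stated objective: alternative
-- what changed: Replaces A's recursion with an explicit stack-driven DFS loop (pushing the 0-child then the 1-child so the 1-branch is popped first), accumulating results iteratively in A's exact order.
import Mathlib
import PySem

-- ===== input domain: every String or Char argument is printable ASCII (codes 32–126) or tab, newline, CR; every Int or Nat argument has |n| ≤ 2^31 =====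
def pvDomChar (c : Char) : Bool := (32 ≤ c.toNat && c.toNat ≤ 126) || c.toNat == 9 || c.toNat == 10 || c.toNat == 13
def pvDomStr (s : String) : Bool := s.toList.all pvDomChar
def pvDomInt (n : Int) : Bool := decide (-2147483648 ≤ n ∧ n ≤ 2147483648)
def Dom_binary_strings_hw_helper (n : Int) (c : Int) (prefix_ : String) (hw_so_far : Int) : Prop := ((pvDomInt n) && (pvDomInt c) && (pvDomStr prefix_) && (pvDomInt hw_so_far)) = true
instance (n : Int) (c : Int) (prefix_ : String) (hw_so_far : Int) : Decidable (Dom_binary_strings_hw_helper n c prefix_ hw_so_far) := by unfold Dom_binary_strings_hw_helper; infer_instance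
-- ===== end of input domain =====

-- B replaces A's recursion with an explicit stack-based DFS loop; same order, same cost (objective: alternative).

-- ===== PORT A =====
-- A's recursion diverges when n < 0 or hw_so_far > c (Python RecursionError); fuel n.toNat + 1
-- makes the Lean transliteration total and is never exhausted on Pre_ (each call decreases n by 1).
def binaryA (fuel : Nat) (n : Int) (c : Int) (prefix_ : String) (hw_so_far : Int) : List String :=
  match fuel with
  | 0 => []
  | f + 1 =>
    if n = 0 ∧ hw_so_far ≤ c then [prefix_]
    else
      (if hw_so_far < c then binaryA f (n - 1) c (prefix_ ++ "1") (hw_so_far + 1) else [])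
        ++ binaryA f (n - 1) c (prefix_ ++ "0") hw_so_far

def binary_strings_hw_helper (n : Int) (c : Int) (prefix_ : String) (hw_so_far : Int) : List String :=
  binaryA (n.toNat + 1) n c prefix_ hw_so_far

-- ===== PORT B =====
-- B's while-loop over the explicit stack; the same fuel bound 2^(n.toNat+1) (total pops of the
-- pruned tree) makes it total and is never exhausted on Pre_. Python's list.pop takes the last
-- element, so the Lean stack keeps the top at the list head.
def binaryBLoop (fuel : Nat) (c : Int) (stack : List (Int × String × Int)) (results : List String) : List String :=
  match fuel, stack with
  | _, [] => results
  | 0, _ => results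
  | f + 1, (m, p, hw) :: rest =>
    if m = 0 ∧ hw ≤ c then binaryBLoop f c rest (results ++ [p])
    else
      binaryBLoop f c
        (if hw < c then (m - 1, p ++ "1", hw + 1) :: (m - 1, p ++ "0", hw) :: rest
         else (m - 1, p ++ "0", hw) :: rest)
        results

def binary_strings_hw_helper_alt (n : Int) (c : Int) (prefix_ : String) (hw_so_far : Int) : List String :=
  binaryBLoop (2 ^ (n.toNat + 1)) c [(n, prefix_, hw_so_far)] []

-- ===== PRECONDITION & SPEC =====
-- Pre_ excludes exactly the inputs (n < 0, or hw_so_far > c) on which Python A recurses forever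
-- and raises RecursionError.
def Pre_binary_strings_hw_helper (n : Int) (c : Int) (prefix_ : String) (hw_so_far : Int) : Prop :=
  0 ≤ n ∧ hw_so_far ≤ c
instance (n : Int) (c : Int) (prefix_ : String) (hw_so_far : Int) : Decidable (Pre_binary_strings_hw_helper n c prefix_ hw_so_far) := by unfold Pre_binary_strings_hw_helper; infer_instance
def pvWitness_binary_strings_hw_helper : Int × Int × String × Int := (3, 1, "", 0)

def Spec_binary_strings_hw_helper (n : Int) (c : Int) (prefix_ : String) (hw_so_far : Int) (out : List String) : Prop := out = binary_strings_hw_helper_alt n c prefix_ hw_so_far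
instance (n : Int) (c : Int) (prefix_ : String) (hw_so_far : Int) (out : List String) : Decidable (Spec_binary_strings_hw_helper n c prefix_ hw_so_far out) := by unfold Spec_binary_strings_hw_helper; infer_instance

-- ===== CLAIM (what is proved, stated in full; the proofs are below) =====
def Claim_equal_binary_strings_hw_helper : Prop := ∀ (n : Int) (c : Int) (prefix_ : String) (hw_so_far : Int), Dom_binary_strings_hw_helper n c prefix_ hw_so_far → Pre_binary_strings_hw_helper n c prefix_ hw_so_far → Spec_binary_strings_hw_helper n c prefix_ hw_so_far (binary_strings_hw_helper n c prefix_ hw_so_far)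

-- ===== LEMMAS AND PROOFS =====

-- Reference function: the common value, structural recursion on k = n.toNat.
def binaryS (k : Nat) (c : Int) (p : String) (hw : Int) : List String :=
  match k with
  | 0 => [p]
  | k + 1 =>
    (if hw < c then binaryS k c (p ++ "1") (hw + 1) else []) ++ binaryS k c (p ++ "0") hw

theorem binaryA_eq_S (f : Nat) (n : Int) (c : Int) (p : String) (hw : Int)
    (h0 : 0 ≤ n) (hhw : hw ≤ c) (hf : n.toNat < f) :
    binaryA f n c p hw = binaryS n.toNat c p hw := by
  induction f generalizing n p hw with
  | zero => omega
  | succ f ih =>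
    by_cases hn : n = 0
    · subst hn
      simp [binaryA, binaryS, hhw]
    · have hk : n.toNat = (n - 1).toNat + 1 := by omega
      rw [binaryA, if_neg (by tauto), hk, binaryS]
      by_cases hlt : hw < c
      · rw [if_pos hlt, if_pos hlt,
          ih (n - 1) (p ++ "1") (hw + 1) (by omega) (by omega) (by omega),
          ih (n - 1) (p ++ "0") hw (by omega) hhw (by omega)]
      · rw [if_neg hlt, if_neg hlt,
          ih (n - 1) (p ++ "0") hw (by omega) hhw (by omega)]

-- cost of one frame in pops
def frameCost (m : Int) : Nat := 2 ^ (m.toNat + 1) - 1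

def stackCost (st : List (Int × String × Int)) : Nat :=
  (st.map (fun t => frameCost t.1)).sum

def stackOk (c : Int) (st : List (Int × String × Int)) : Prop :=
  ∀ t ∈ st, 0 ≤ t.1 ∧ t.2.2 ≤ c

theorem binaryBLoop_eq (f : Nat) (c : Int) (st : List (Int × String × Int)) (res : List String)
    (hok : stackOk c st) (hf : stackCost st ≤ f) :
    binaryBLoop f c st res = res ++ (st.map (fun t => binaryS t.1.toNat c t.2.1 t.2.2)).flatten := by
  induction f generalizing st res with
  | zero =>
    cases st with
    | nil => simp [binaryBLoop]
    | cons t rest =>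
      exfalso
      have : 1 ≤ frameCost t.1 := by
        have : 1 ≤ 2 ^ (t.1.toNat + 1) - 1 := by
          have : 2 ≤ 2 ^ (t.1.toNat + 1) := by
            calc 2 = 2 ^ 1 := by norm_num
            _ ≤ 2 ^ (t.1.toNat + 1) := Nat.pow_le_pow_right (by norm_num) (by omega)
          omega
        exact this
      simp [stackCost] at hf
      omega
  | succ f ih =>
    cases st with
    | nil => simp [binaryBLoop]
    | cons t rest =>
      obtain ⟨m, p, hw⟩ := t
      have hmem : (m, p, hw) ∈ (m, p, hw) :: rest := List.mem_cons_self
      obtain ⟨hm0, hhw⟩ := hok _ hmem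
      have hokr : stackOk c rest := fun t ht => hok t (List.mem_cons_of_mem _ ht)
      have hcost : frameCost m + stackCost rest = stackCost ((m, p, hw) :: rest) := by
        simp [stackCost]
      by_cases hn : m = 0
      · subst hn
        rw [binaryBLoop, if_pos ⟨rfl, hhw⟩,
          ih rest (res ++ [p]) hokr (by
            have : frameCost (0 : Int) = 1 := by decide
            omega)]
        simp [binaryS]
      · have hk : m.toNat = (m - 1).toNat + 1 := by omega
        have hfc : frameCost m = 1 + frameCost (m - 1) + frameCost (m - 1) := by
          unfold frameCost
          rw [hk]
          have h2 : 1 ≤ 2 ^ ((m - 1).toNat + 1) := Nat.one_le_two_pow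
          rw [pow_succ]
          omega
        rw [binaryBLoop, if_neg (by tauto)]
        by_cases hlt : hw < c
        · rw [if_pos hlt,
            ih _ res (by
              intro t ht
              simp only [List.mem_cons] at ht
              rcases ht with rfl | rfl | h
              · exact ⟨by omega, by show hw + 1 ≤ c; omega⟩
              · exact ⟨by omega, hhw⟩
              · exact hokr t h)
            (by simp [stackCost] at hf ⊢; omega)]
          simp only [List.map_cons, List.flatten_cons]
          rw [hk, binaryS, if_pos hlt]
          simp
        · rw [if_neg hlt,
            ih _ res (by
              intro t ht
              simp only [List.mem_cons] at ht
              rcases ht with rfl | h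
              · exact ⟨by omega, hhw⟩
              · exact hokr t h)
            (by simp [stackCost] at hf ⊢; omega)]
          simp only [List.map_cons, List.flatten_cons]
          rw [hk, binaryS, if_neg hlt]
          simp

-- ===== VERDICT (by name: the statement is the Claim_ definition above) =====
theorem binary_strings_hw_helper_spec : Claim_equal_binary_strings_hw_helper := by
  intro n c p hw _ hpre
  obtain ⟨h0, hhw⟩ := hpre
  unfold Spec_binary_strings_hw_helper binary_strings_hw_helper binary_strings_hw_helper_alt
  rw [binaryA_eq_S _ n c p hw h0 hhw (by omega),
    binaryBLoop_eq _ c [(n, p, hw)] [] (by intro t ht; simp at ht; subst ht; exact ⟨h0, hhw⟩)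
      (by simp [stackCost, frameCost])]
  simp
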